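-- pv_equiv track=rewrite | github.com/alimshirdel/ali-haircut-booking-django | shops/views.py | move_jalali_month
-- ===== SOURCE A (Python) =====
-- def move_jalali_month(year, month, delta):
--     # delta = +1 for next, -1 for prev
--     month += delta
--     while month < 1:
--         month += 12
--         year -= 1
--     while month > 12:
--         month -= 12
--         year += 1
--     return year, month
-- ===== SOURCE B (Python) =====
-- def move_jalali_month(year, month, delta):
--     total = month + delta - 1
--     return year + total // 12, total % 12 + 1
-- ===== Notes on version B (the rewrite author's own statement) =====
-- stated objective: simpler
-- what changed: Replaced the two wraparound while-loops with closed-form floor division and modulo on the zero-indexed month count.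
import Mathlib
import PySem

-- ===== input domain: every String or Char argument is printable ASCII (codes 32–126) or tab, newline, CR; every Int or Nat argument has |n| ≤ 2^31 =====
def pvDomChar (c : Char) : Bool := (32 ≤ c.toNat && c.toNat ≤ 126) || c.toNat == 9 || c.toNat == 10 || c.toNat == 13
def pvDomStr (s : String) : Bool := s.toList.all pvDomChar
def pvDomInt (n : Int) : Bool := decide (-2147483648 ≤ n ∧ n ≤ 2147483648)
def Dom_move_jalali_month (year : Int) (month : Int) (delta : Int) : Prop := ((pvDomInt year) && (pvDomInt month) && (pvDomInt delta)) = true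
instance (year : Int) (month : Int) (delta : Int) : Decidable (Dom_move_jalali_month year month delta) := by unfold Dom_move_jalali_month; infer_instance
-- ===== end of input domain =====

-- B replaces A's two wraparound while-loops with closed-form floor division/modulo (simpler, O(1)).


-- ===== PORT A =====
-- while month < 1: month += 12; year -= 1
def pvLoopUp (year : Int) (month : Int) : Int × Int :=
  if month < 1 then pvLoopUp (year - 1) (month + 12) else (year, month)
  termination_by (1 - month).toNat
  decreasing_by omega

-- while month > 12: month -= 12; year += 1
def pvLoopDown (year : Int) (month : Int) : Int × Int :=
  if month > 12 then pvLoopDown (year + 1) (month - 12) else (year, month)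
  termination_by (month - 12).toNat
  decreasing_by omega

def move_jalali_month (year : Int) (month : Int) (delta : Int) : Int × Int :=
  let month := month + delta
  let p := pvLoopUp year month
  pvLoopDown p.1 p.2

-- ===== PORT B =====
def move_jalali_month_alt (year : Int) (month : Int) (delta : Int) : Int × Int :=
  let total := month + delta - 1
  (year + PySem.Int.floordiv total 12, PySem.Int.mod total 12 + 1)

-- ===== PRECONDITION & SPEC =====
def Spec_move_jalali_month (year : Int) (month : Int) (delta : Int) (out : Int × Int) : Prop := out = move_jalali_month_alt year month delta
instance (year : Int) (month : Int) (delta : Int) (out : Int × Int) : Decidable (Spec_move_jalali_month year month delta out) := by unfold Spec_move_jalali_month; infer_instance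

-- ===== CLAIM (what is proved, stated in full; the proofs are below) =====
def Claim_equal_move_jalali_month : Prop := ∀ (year : Int) (month : Int) (delta : Int), Dom_move_jalali_month year month delta → Spec_move_jalali_month year month delta (move_jalali_month year month delta)

-- ===== LEMMAS AND PROOFS =====

-- closed form of both loops, stated via Int.ediv/emod (= floordiv/mod for positive divisor)
def pvClosed (year : Int) (month : Int) : Int × Int :=
  (year + (month - 1) / 12, (month - 1) % 12 + 1)

theorem pvLoopDown_closed (year month : Int) (h : 1 ≤ month) :
    pvLoopDown year month = pvClosed year month := by
  rw [pvLoopDown]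
  split_ifs with hgt
  · rw [pvLoopDown_closed (year + 1) (month - 12) (by omega)]
    unfold pvClosed
    simp only [Prod.mk.injEq]; constructor <;> omega
  · unfold pvClosed
    have h1 : (month - 1) / 12 = 0 := by omega
    have h2 : (month - 1) % 12 = month - 1 := by omega
    rw [h1, h2]; simp only [Prod.mk.injEq]; constructor <;> omega
  termination_by (month - 12).toNat
  decreasing_by omega

theorem pvLoop_closed (year month : Int) :
    pvLoopDown (pvLoopUp year month).1 (pvLoopUp year month).2 = pvClosed year month := by
  rw [pvLoopUp]
  split_ifs with hlt
  · rw [pvLoop_closed (year - 1) (month + 12)]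
    unfold pvClosed
    simp only [Prod.mk.injEq]; constructor <;> omega
  · exact pvLoopDown_closed year month (by omega)
  termination_by (1 - month).toNat
  decreasing_by omega

-- ===== VERDICT (by name: the statement is the Claim_ definition above) =====
theorem move_jalali_month_spec : Claim_equal_move_jalali_month := by
  intro year month delta _
  unfold Spec_move_jalali_month move_jalali_month move_jalali_month_alt
  simp only
  rw [pvLoop_closed]
  unfold pvClosed
  rw [PySem.Int.floordiv_eq_ediv_of_pos (by omega), PySem.Int.mod_eq_emod_of_pos (by omega)]
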